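-- pv_equiv track=rewrite | github.com/dtunka123/Vargus | bot/bot.py | analyze_accounts
-- ===== SOURCE A (Python) =====
-- def normalize_text(value):
--     return (value or "").strip().lower()
--
-- def compute_account_health(account):
--     """Classify account health from account status and joining/proxy signals."""
--     status = normalize_text(account.get("status"))
--     joining = normalize_text(account.get("joining"))
--     proxy_status = normalize_text(account.get("proxy_status"))
--
--     if "disabled" in status or "re-auth" in status:
--         return "disabled", "Disabled", "🔴"
--     if "failing" in proxy_status or "failing" in status:
--         return "failing", "Failing", "🟠"
--     if "paused" in joining or "paused" in proxy_status:
--         return "paused", "Paused", "⏸️"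
--     if "active" in status and ("enabled" in joining or not joining):
--         return "healthy", "Healthy", "🟢"
--     return "unknown", "Unknown", "❓"
--
-- def analyze_accounts(accounts):
--     # Enhanced: consider both account status and proxy health
--     healthy = []
--     paused = []
--     failing = []
--     disabled = []
--     unknown = []
--     listeners = []
--     scrappers = []
--     texters = []
--     for a in accounts:
--         acc_type = a.get("type", "Unknown")
--         if acc_type == "Listener":
--             listeners.append(a)
--         elif acc_type == "Scrapper":
--             scrappers.append(a)
--         elif acc_type == "Texter":
--             texters.append(a)
--
--         health_key, health_label, health_emoji = compute_account_health(a)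
--         a["health"] = health_key
--         a["health_label"] = health_label
--         a["health_emoji"] = health_emoji
--
--         if health_key == "paused":
--             paused.append(a)
--         elif health_key == "failing":
--             failing.append(a)
--         elif health_key == "disabled":
--             disabled.append(a)
--         elif health_key == "healthy":
--             healthy.append(a)
--         else:
--             unknown.append(a)
--     return healthy, paused, failing, disabled, unknown, listeners, scrappers, texters
-- ===== SOURCE B (Python) =====
-- def normalize_text(value):
--     return (value or "").strip().lower()
--
-- def compute_account_health(account):
--     """Classify account health from account status and joining/proxy signals."""
--     status = normalize_text(account.get("status"))
--     joining = normalize_text(account.get("joining"))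
--     proxy_status = normalize_text(account.get("proxy_status"))
--
--     if "disabled" in status or "re-auth" in status:
--         return "disabled", "Disabled", "🔴"
--     if "failing" in proxy_status or "failing" in status:
--         return "failing", "Failing", "🟠"
--     if "paused" in joining or "paused" in proxy_status:
--         return "paused", "Paused", "⏸️"
--     if "active" in status and ("enabled" in joining or not joining):
--         return "healthy", "Healthy", "🟢"
--     return "unknown", "Unknown", "❓"
--
-- def analyze_accounts(accounts):
--     # Annotate every account in place first (same mutation as the original),
--     # then build each bucket by an independent filter over the annotated list.
--     for a in accounts:
--         a["health"], a["health_label"], a["health_emoji"] = compute_account_health(a)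
--
--     listeners = [a for a in accounts if a.get("type", "Unknown") == "Listener"]
--     scrappers = [a for a in accounts if a.get("type", "Unknown") == "Scrapper"]
--     texters = [a for a in accounts if a.get("type", "Unknown") == "Texter"]
--
--     healthy = [a for a in accounts if a["health"] == "healthy"]
--     paused = [a for a in accounts if a["health"] == "paused"]
--     failing = [a for a in accounts if a["health"] == "failing"]
--     disabled = [a for a in accounts if a["health"] == "disabled"]
--     unknown = [a for a in accounts if a["health"] not in ("paused", "failing", "disabled", "healthy")]
--
--     return healthy, paused, failing, disabled, unknown, listeners, scrappers, texters
-- ===== Notes on version B (the rewrite author's own statement) =====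
-- stated objective: simpler
-- what changed: Replaces the fused single pass with eight interleaved accumulators by an annotate-in-place loop followed by eight independent filter comprehensions over the annotated list.
import Mathlib
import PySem

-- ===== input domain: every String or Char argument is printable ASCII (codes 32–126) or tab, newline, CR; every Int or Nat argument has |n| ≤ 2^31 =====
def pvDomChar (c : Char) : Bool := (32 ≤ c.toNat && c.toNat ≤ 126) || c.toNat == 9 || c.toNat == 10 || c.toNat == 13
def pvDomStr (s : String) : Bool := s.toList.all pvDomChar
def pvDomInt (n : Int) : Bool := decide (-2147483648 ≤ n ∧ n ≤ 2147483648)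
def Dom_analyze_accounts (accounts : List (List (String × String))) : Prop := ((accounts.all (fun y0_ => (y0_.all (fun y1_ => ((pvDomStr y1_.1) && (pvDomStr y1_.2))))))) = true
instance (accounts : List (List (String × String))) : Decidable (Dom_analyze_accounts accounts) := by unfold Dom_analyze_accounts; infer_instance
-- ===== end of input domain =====

-- B: annotate every account first, then build each bucket by an independent filter
-- (simpler decomposition, same cost). Note: the Python mutates each account dict in
-- place; both Pythons perform the same mutation, and the ports model the RETURN value
-- (every bucket holds the annotated dict, as the Python caller observes after aliasing).


abbrev Acct := List (String × String)
abbrev Out8 := List Acct × List Acct × List Acct × List Acct × List Acct × List Acct × List Acct × List Acct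

-- ===== PORT A =====
-- (value or "").strip().lower(); for the get? result, none and "" both normalise to ""
def normalize_text (value : Option String) : String :=
  PySem.Str.lower (PySem.Str.strip (value.getD ""))

def compute_account_health (account : Acct) : String × String × String :=
  let status := normalize_text ((PySem.Dict.mk account).get? "status")
  let joining := normalize_text ((PySem.Dict.mk account).get? "joining")
  let proxy_status := normalize_text ((PySem.Dict.mk account).get? "proxy_status")
  if PySem.Str.isIn "disabled" status || PySem.Str.isIn "re-auth" status then
    ("disabled", "Disabled", "🔴")
  else if PySem.Str.isIn "failing" proxy_status || PySem.Str.isIn "failing" status then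
    ("failing", "Failing", "🟠")
  else if PySem.Str.isIn "paused" joining || PySem.Str.isIn "paused" proxy_status then
    ("paused", "Paused", "⏸️")
  else if PySem.Str.isIn "active" status && (PySem.Str.isIn "enabled" joining || joining == "") then
    ("healthy", "Healthy", "🟢")
  else
    ("unknown", "Unknown", "❓")

-- a["health"], a["health_label"], a["health_emoji"] = … : the three in-place assignments
-- both Pythons perform on every account (shared by both ports)
def pvAnn (a : Acct) : Acct :=
  let c := compute_account_health a
  (((((PySem.Dict.mk a).insert "health" c.1).insert "health_label" c.2.1).insert "health_emoji" c.2.2)).items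

-- one iteration of A's loop over the eight accumulators; Python appends the dict object
-- `a` itself, which it then mutates, so the value finally held in every bucket is the
-- annotated dict a'
def pvStepA (st : Out8) (a : Acct) : Out8 :=
  let (healthy, paused, failing, disabled, unknown, listeners, scrappers, texters) := st
  let acc_type := (PySem.Dict.mk a).getD "type" "Unknown"
  let c := compute_account_health a
  let a' := pvAnn a
  let (listeners, scrappers, texters) :=
    if acc_type == "Listener" then (listeners ++ [a'], scrappers, texters)
    else if acc_type == "Scrapper" then (listeners, scrappers ++ [a'], texters)
    else if acc_type == "Texter" then (listeners, scrappers, texters ++ [a'])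
    else (listeners, scrappers, texters)
  if c.1 == "paused" then (healthy, paused ++ [a'], failing, disabled, unknown, listeners, scrappers, texters)
  else if c.1 == "failing" then (healthy, paused, failing ++ [a'], disabled, unknown, listeners, scrappers, texters)
  else if c.1 == "disabled" then (healthy, paused, failing, disabled ++ [a'], unknown, listeners, scrappers, texters)
  else if c.1 == "healthy" then (healthy ++ [a'], paused, failing, disabled, unknown, listeners, scrappers, texters)
  else (healthy, paused, failing, disabled, unknown ++ [a'], listeners, scrappers, texters)

def analyze_accounts (accounts : List (List (String × String))) : (List (List (String × String))) × (List (List (String × String))) × (List (List (String × String))) × (List (List (String × String))) × (List (List (String × String))) × (List (List (String × String))) × (List (List (String × String))) × (List (List (String × String))) :=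
  accounts.foldl pvStepA ([], [], [], [], [], [], [], [])

-- ===== PORT B =====
def pvHealthOf (a : Acct) : String := (PySem.Dict.mk a).getD "health" ""

def pvTypeOf (a : Acct) : String := (PySem.Dict.mk a).getD "type" "Unknown"

def analyze_accounts_alt (accounts : List (List (String × String))) : (List (List (String × String))) × (List (List (String × String))) × (List (List (String × String))) × (List (List (String × String))) × (List (List (String × String))) × (List (List (String × String))) × (List (List (String × String))) × (List (List (String × String))) :=
  let anns := accounts.map pvAnn
  let listeners := anns.filter (fun a => pvTypeOf a == "Listener")
  let scrappers := anns.filter (fun a => pvTypeOf a == "Scrapper")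
  let texters := anns.filter (fun a => pvTypeOf a == "Texter")
  let healthy := anns.filter (fun a => pvHealthOf a == "healthy")
  let paused := anns.filter (fun a => pvHealthOf a == "paused")
  let failing := anns.filter (fun a => pvHealthOf a == "failing")
  let disabled := anns.filter (fun a => pvHealthOf a == "disabled")
  let unknown := anns.filter (fun a => !(["paused", "failing", "disabled", "healthy"].contains (pvHealthOf a)))
  (healthy, paused, failing, disabled, unknown, listeners, scrappers, texters)

-- ===== PRECONDITION & SPEC =====
def Spec_analyze_accounts (accounts : List (List (String × String))) (out : (List (List (String × String))) × (List (List (String × String))) × (List (List (String × String))) × (List (List (String × String))) × (List (List (String × String))) × (List (List (String × String))) × (List (List (String × String))) × (List (List (String × String)))) : Prop := out = analyze_accounts_alt accounts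
instance (accounts : List (List (String × String))) (out : (List (List (String × String))) × (List (List (String × String))) × (List (List (String × String))) × (List (List (String × String))) × (List (List (String × String))) × (List (List (String × String))) × (List (List (String × String))) × (List (List (String × String)))) : Decidable (Spec_analyze_accounts accounts out) := by
  unfold Spec_analyze_accounts
  haveI h2 : DecidableEq (List Acct × List Acct) := instDecidableEqProd
  haveI h3 : DecidableEq (List Acct × List Acct × List Acct) := instDecidableEqProd
  haveI h4 : DecidableEq (List Acct × List Acct × List Acct × List Acct) := instDecidableEqProd
  haveI h5 : DecidableEq (List Acct × List Acct × List Acct × List Acct × List Acct) := instDecidableEqProd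
  haveI h6 : DecidableEq (List Acct × List Acct × List Acct × List Acct × List Acct × List Acct) := instDecidableEqProd
  haveI h7 : DecidableEq (List Acct × List Acct × List Acct × List Acct × List Acct × List Acct × List Acct) := instDecidableEqProd
  haveI h8 : DecidableEq (List Acct × List Acct × List Acct × List Acct × List Acct × List Acct × List Acct × List Acct) := instDecidableEqProd
  exact h8 out (analyze_accounts_alt accounts)

-- ===== CLAIM (what is proved, stated in full; the proofs are below) =====
def Claim_equal_analyze_accounts : Prop := ∀ (accounts : List (List (String × String))), Dom_analyze_accounts accounts → Spec_analyze_accounts accounts (analyze_accounts accounts)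

-- ===== LEMMAS AND PROOFS =====

-- structure eta: rebuilding a Dict from its items list is the identity
lemma pv_mk_items (d : PySem.Dict String String) : PySem.Dict.mk d.items = d := rfl

lemma healthOf_ann (a : Acct) : pvHealthOf (pvAnn a) = (compute_account_health a).1 := by
  simp [pvHealthOf, pvAnn, pv_mk_items, PySem.Dict.getD_insert, PySem.Dict.getD_insert_self]

lemma typeOf_ann (a : Acct) : pvTypeOf (pvAnn a) = (PySem.Dict.mk a).getD "type" "Unknown" := by
  simp [pvTypeOf, pvAnn, pv_mk_items, PySem.Dict.getD_insert]

-- (if c then [x] else []) ++ L, the shape A's conditional appends take after the fold lemma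
lemma pv_ite_append {α : Type} (c : Prop) [Decidable c] (x : α) (L : List α) :
    (if c then [x] else []) ++ L = if c then x :: L else L := by
  split <;> simp

-- one iteration of A's loop, phrased as B's conditional singletons
lemma stepA_eq (h p f d u l s t : List Acct) (a : Acct) :
    pvStepA (h, p, f, d, u, l, s, t) a =
      (h ++ (if pvHealthOf (pvAnn a) == "healthy" then [pvAnn a] else []),
       p ++ (if pvHealthOf (pvAnn a) == "paused" then [pvAnn a] else []),
       f ++ (if pvHealthOf (pvAnn a) == "failing" then [pvAnn a] else []),
       d ++ (if pvHealthOf (pvAnn a) == "disabled" then [pvAnn a] else []),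
       u ++ (if !(["paused", "failing", "disabled", "healthy"].contains (pvHealthOf (pvAnn a))) then [pvAnn a] else []),
       l ++ (if pvTypeOf (pvAnn a) == "Listener" then [pvAnn a] else []),
       s ++ (if pvTypeOf (pvAnn a) == "Scrapper" then [pvAnn a] else []),
       t ++ (if pvTypeOf (pvAnn a) == "Texter" then [pvAnn a] else [])) := by
  simp only [healthOf_ann, typeOf_ann, pvStepA]
  split_ifs with h1 h2 h3 h4 h5 h6 h7 <;> simp_all

lemma foldl_stepA (xs : List Acct) : ∀ (h p f d u l s t : List Acct),
    xs.foldl pvStepA (h, p, f, d, u, l, s, t) =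
      (h ++ (xs.map pvAnn).filter (fun a => pvHealthOf a == "healthy"),
       p ++ (xs.map pvAnn).filter (fun a => pvHealthOf a == "paused"),
       f ++ (xs.map pvAnn).filter (fun a => pvHealthOf a == "failing"),
       d ++ (xs.map pvAnn).filter (fun a => pvHealthOf a == "disabled"),
       u ++ (xs.map pvAnn).filter (fun a => !(["paused", "failing", "disabled", "healthy"].contains (pvHealthOf a))),
       l ++ (xs.map pvAnn).filter (fun a => pvTypeOf a == "Listener"),
       s ++ (xs.map pvAnn).filter (fun a => pvTypeOf a == "Scrapper"),
       t ++ (xs.map pvAnn).filter (fun a => pvTypeOf a == "Texter")) := by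
  induction xs with
  | nil => intro h p f d u l s t; simp
  | cons a xs ih =>
    intro h p f d u l s t
    rw [List.foldl_cons, stepA_eq, ih]
    simp only [List.map_cons, List.filter_cons, List.append_assoc, pv_ite_append]

-- ===== VERDICT (by name: the statement is the Claim_ definition above) =====
theorem analyze_accounts_spec : Claim_equal_analyze_accounts := by
  intro accounts _
  unfold Spec_analyze_accounts analyze_accounts analyze_accounts_alt
  rw [foldl_stepA]
  simp
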